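-- pv_equiv track=rewrite | github.com/dengguojie/vue-element-admin | ops/built-in/tbe/impl/strided_slice_d.py | _check_strides_larger_than_one
-- ===== SOURCE A (Python) =====
-- def _check_strides_larger_than_one(strides):
--     """
--     check strides larger than one
--     """
--     flag = True
--     for value in strides:
--         if value < 1:
--             flag = False
--     for value in strides:
--         if value > 1 and flag:
--             return True
--     return False
-- ===== SOURCE B (Python) =====
-- def _check_strides_larger_than_one(strides):
--     """
--     check strides larger than one
--     """
--     ordered = sorted(strides)
--     return bool(ordered) and ordered[0] >= 1 and ordered[-1] > 1
-- ===== Notes on version B (the rewrite author's own statement) =====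
-- stated objective: alternative
-- what changed: Sorts the strides once and decides by inspecting the two endpoints of the ordered list (smallest >= 1, largest > 1), instead of A's two flag-carrying scans; trades O(n) scanning for an O(n log n) sort with trivial endpoint checks.
import Mathlib
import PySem

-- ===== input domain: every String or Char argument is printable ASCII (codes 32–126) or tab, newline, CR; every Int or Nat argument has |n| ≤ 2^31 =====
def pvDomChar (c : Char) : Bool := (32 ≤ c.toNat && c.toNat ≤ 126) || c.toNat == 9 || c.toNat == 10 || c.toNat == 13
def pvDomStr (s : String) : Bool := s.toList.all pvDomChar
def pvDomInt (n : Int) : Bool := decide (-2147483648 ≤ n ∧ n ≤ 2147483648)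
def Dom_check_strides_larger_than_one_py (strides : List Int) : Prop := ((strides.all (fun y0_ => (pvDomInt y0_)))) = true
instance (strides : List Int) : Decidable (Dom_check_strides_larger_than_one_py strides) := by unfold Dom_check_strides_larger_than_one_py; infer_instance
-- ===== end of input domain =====

-- B replaces A's two flag-carrying scans by sorting once and inspecting the two endpoints of the ordered list (alternative algorithm; O(n log n) vs O(n)).

-- ===== PORT A =====
-- first loop: flag starts True, set to False whenever a value < 1 is seen
-- second loop: return True at the first value > 1 while flag holds, else False
def check_strides_larger_than_one_py (strides : List Int) : Bool :=
  let flag := strides.foldl (fun f value => if value < 1 then false else f) true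
  strides.any (fun value => decide (value > 1) && flag)

-- ===== PORT B =====
-- ordered = sorted(strides); return bool(ordered) and ordered[0] >= 1 and ordered[-1] > 1
-- (Python 'and' short-circuits: the indexings happen only on a non-empty list)
def check_strides_larger_than_one_py_alt (strides : List Int) : Bool :=
  let ordered := PySem.List.sorted strides (fun x => x) false
  if ordered.isEmpty then false
  else
    match PySem.List.pyGet? ordered 0, PySem.List.pyGet? ordered (-1) with
    | some first, some lastv => decide (first ≥ 1) && decide (lastv > 1)
    | _, _ => false

-- ===== PRECONDITION & SPEC =====
def Spec_check_strides_larger_than_one_py (strides : List Int) (out : Bool) : Prop := out = check_strides_larger_than_one_py_alt strides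
instance (strides : List Int) (out : Bool) : Decidable (Spec_check_strides_larger_than_one_py strides out) := by unfold Spec_check_strides_larger_than_one_py; infer_instance

-- ===== CLAIM (what is proved, stated in full; the proofs are below) =====
def Claim_equal_check_strides_larger_than_one_py : Prop := ∀ (strides : List Int), Dom_check_strides_larger_than_one_py strides → Spec_check_strides_larger_than_one_py strides (check_strides_larger_than_one_py strides)

-- ===== LEMMAS AND PROOFS =====

-- A's flag fold is 'all values ≥ 1'
lemma pv_flag_eq (l : List Int) (b : Bool) :
    l.foldl (fun f value => if value < 1 then false else f) b
      = (b && l.all (fun v => decide (1 ≤ v))) := by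
  induction l generalizing b with
  | nil => simp
  | cons x t ih =>
    simp only [List.foldl_cons, List.all_cons, ih]
    by_cases h : x < 1
    · simp [h, show ¬(1 ≤ x) by omega]
    · simp [h, show (1 : Int) ≤ x by omega]

-- every element of a ≤-sorted list is at most its last element
lemma pv_le_getLast (l : List Int) (hp : l.Pairwise (· ≤ ·)) (y : Int) (hy : y ∈ l)
    (h : l ≠ []) : y ≤ l.getLast h := by
  induction l with
  | nil => cases hy
  | cons x t ih =>
    rcases List.pairwise_cons.mp hp with ⟨hx, ht⟩
    cases t with
    | nil => simp at hy; simp [hy]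
    | cons z s =>
      rw [List.getLast_cons (by simp)]
      rcases List.mem_cons.mp hy with rfl | hy
      · exact le_trans (hx _ (List.getLast_mem _)) (le_refl _)
      · exact ih ht hy (by simp)

-- ===== VERDICT (by name: the statement is the Claim_ definition above) =====
theorem check_strides_larger_than_one_py_spec : Claim_equal_check_strides_larger_than_one_py := by
  intro strides _
  show check_strides_larger_than_one_py strides = check_strides_larger_than_one_py_alt strides
  unfold check_strides_larger_than_one_py check_strides_larger_than_one_py_alt
  cases h : PySem.List.sorted strides (fun x => x) false with
  | nil =>
    have hs : strides = [] := (PySem.List.sorted_eq_nil_iff _ _ _).mp h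
    subst hs; rfl
  | cons m t =>
    have hperm := PySem.List.sorted_perm strides (fun x => x) false
    rw [h] at hperm
    have hmem : ∀ y : Int, y ∈ m :: t ↔ y ∈ strides := fun y => hperm.mem_iff
    have hpw : (m :: t).Pairwise (fun a b : Int => a ≤ b) := by
      have := PySem.List.sorted_pairwise (xs := strides) (key := fun x => x)
      rwa [h] at this
    have hhead : ∀ y ∈ strides, m ≤ y :=
      PySem.List.key_head_sorted_le (xs := strides) (key := fun x => x) h
    simp only [List.isEmpty_cons, if_neg Bool.false_ne_true,
      PySem.List.pyGet?_zero_cons, PySem.List.pyGet?_neg_one]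
    have hne : (m :: t) ≠ [] := by simp
    rw [List.getLast?_eq_some_getLast hne]
    rw [pv_flag_eq, Bool.eq_iff_iff]
    simp only [Bool.true_and, List.any_eq_true, List.all_eq_true, Bool.and_eq_true,
      decide_eq_true_eq, ge_iff_le, gt_iff_lt]
    constructor
    · rintro ⟨v, hv, h1, hall⟩
      refine ⟨hall m ((hmem m).mp List.mem_cons_self), ?_⟩
      have hvle : v ≤ (m :: t).getLast hne :=
        pv_le_getLast _ hpw v ((hmem v).mpr hv) hne
      omega
    · rintro ⟨hm, hlast⟩
      refine ⟨(m :: t).getLast hne, (hmem _).mp (List.getLast_mem hne), hlast, ?_⟩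
      intro w hw
      exact le_trans hm (hhead w hw)
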